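-- pv_equiv track=rewrite | github.com/whitakk/wbb-bracket-matrix | tests/test_parsers.py | _balanced_pairs
-- ===== SOURCE A (Python) =====
-- def _team_label(index: int) -> str:
--     letters = "ABCDEFGHIJKLMNOPQRSTUVWXYZ"
--     first = letters[index % 26]
--     second = letters[(index // 26) % 26]
--     return f"Team {first}{second}"
--
-- def _balanced_pairs(count_per_seed: int = 4) -> list[tuple[int, str, bool]]:
--     pairs: list[tuple[int, str, bool]] = []
--     index = 0
--     for seed in range(1, 17):
--         for _ in range(count_per_seed):
--             pairs.append((seed, _team_label(index), False))
--             index += 1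
--     return pairs
-- ===== SOURCE B (Python) =====
-- def _team_label(index: int) -> str:
--     letters = "ABCDEFGHIJKLMNOPQRSTUVWXYZ"
--     first = letters[index % 26]
--     second = letters[(index // 26) % 26]
--     return f"Team {first}{second}"
--
-- def _balanced_pairs(count_per_seed: int = 4) -> list[tuple[int, str, bool]]:
--     # staged construction: build the full seeds column by list repetition,
--     # then the labels column, then zip the two columns into rows
--     seeds: list[int] = []
--     for seed in range(1, 17):
--         seeds += [seed] * count_per_seed
--     labels = [_team_label(i) for i in range(len(seeds))]
--     return [(s, lab, False) for s, lab in zip(seeds, labels)]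
-- ===== Notes on version B (the rewrite author's own statement) =====
-- stated objective: alternative
-- what changed: Replaces A's single nested loop with a running index counter by a staged columnar construction: first the seeds column built by list repetition ([seed]*count_per_seed per seed), then the labels column from range(len(seeds)), finally zipping the two columns into rows.
import Mathlib
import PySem

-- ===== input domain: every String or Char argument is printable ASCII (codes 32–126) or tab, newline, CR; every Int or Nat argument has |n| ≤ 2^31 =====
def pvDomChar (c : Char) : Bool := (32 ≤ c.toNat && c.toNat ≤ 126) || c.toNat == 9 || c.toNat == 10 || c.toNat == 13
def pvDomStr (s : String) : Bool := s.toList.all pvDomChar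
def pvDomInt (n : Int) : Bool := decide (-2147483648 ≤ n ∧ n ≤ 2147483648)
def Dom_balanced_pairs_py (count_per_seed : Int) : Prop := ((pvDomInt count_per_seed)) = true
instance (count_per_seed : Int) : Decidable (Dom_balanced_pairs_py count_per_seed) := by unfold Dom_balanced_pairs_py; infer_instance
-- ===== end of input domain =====

-- B replaces A's nested loop with a running index counter by a staged columnar
-- construction (seeds column by repetition, labels column, zip) — alternative.

-- shared helper: Python _team_label (identical in A and B); the index arguments
-- passed by both ports always make the letter lookups in-range, so pyGetD is exact.
def team_label (index : Int) : String :=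
  let letters := "ABCDEFGHIJKLMNOPQRSTUVWXYZ".toList
  let first := PySem.List.pyGetD letters (PySem.Int.mod index 26) ' '
  let second := PySem.List.pyGetD letters (PySem.Int.mod (PySem.Int.floordiv index 26) 26) ' '
  String.ofList ("Team ".toList ++ [first, second])

-- ===== PORT A =====
def balanced_pairs_py (count_per_seed : Int) : List (Int × String × Bool) :=
  ((PySem.List.pyRange 1 17 1).foldl
    (fun (st : List (Int × String × Bool) × Int) seed =>
      (PySem.List.pyRange 0 count_per_seed 1).foldl
        (fun st2 _ => (st2.1 ++ [(seed, team_label st2.2, false)], st2.2 + 1)) st)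
    ([], 0)).1

-- ===== PORT B =====
def balanced_pairs_py_alt (count_per_seed : Int) : List (Int × String × Bool) :=
  let seeds := (PySem.List.pyRange 1 17 1).foldl
    (fun (acc : List Int) seed => acc ++ List.replicate count_per_seed.toNat seed) []
  let labels := (PySem.List.pyRange 0 (seeds.length : Int) 1).map team_label
  (seeds.zip labels).map (fun p => (p.1, p.2, false))

-- ===== PRECONDITION & SPEC =====
def Spec_balanced_pairs_py (count_per_seed : Int) (out : List (Int × String × Bool)) : Prop := out = balanced_pairs_py_alt count_per_seed
instance (count_per_seed : Int) (out : List (Int × String × Bool)) : Decidable (Spec_balanced_pairs_py count_per_seed out) := by unfold Spec_balanced_pairs_py; infer_instance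

-- ===== CLAIM (what is proved, stated in full; the proofs are below) =====
def Claim_equal_balanced_pairs_py : Prop := ∀ (count_per_seed : Int), Dom_balanced_pairs_py count_per_seed → Spec_balanced_pairs_py count_per_seed (balanced_pairs_py count_per_seed)

-- ===== LEMMAS AND PROOFS =====

-- A's inner loop: appends one labelled pair per iteration, advancing the index.
lemma inner_fold (n : ℕ) (seed : Int) (L : List (Int × String × Bool)) (k : Int) :
    (List.range n).foldl
        (fun (st2 : List (Int × String × Bool) × Int) (_ : ℕ) =>
          (st2.1 ++ [(seed, team_label st2.2, false)], st2.2 + 1)) (L, k)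
      = (L ++ (List.range n).map (fun (j : ℕ) => (seed, team_label (k + (j : Int)), false)), k + n) := by
  induction n generalizing L k with
  | zero => simp
  | succ n ih =>
    rw [List.range_succ, List.foldl_append, ih]
    simp only [List.foldl_cons, List.foldl_nil, List.map_append, List.map_cons, List.map_nil,
      List.append_assoc, Prod.mk.injEq]
    refine ⟨by trivial, by push_cast; ring⟩

-- A's outer loop over seeds s+1 for s < m, with invariant: after m seeds the
-- accumulated list is the flat map over range (m*n) and the index is m*n.
lemma outer_fold (n : ℕ) (hn : 0 < n) (m : ℕ) :
    (List.range m).foldl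
        (fun (st : List (Int × String × Bool) × Int) (s : ℕ) =>
          (List.range n).foldl
            (fun st2 (_ : ℕ) => (st2.1 ++ [(((s : Int) + 1), team_label st2.2, false)], st2.2 + 1)) st)
        ([], 0)
      = ((List.range (m * n)).map
            (fun i => ((((i / n : ℕ) : Int) + 1), team_label (i : Int), false)),
          ((m * n : ℕ) : Int)) := by
  induction m with
  | zero => simp
  | succ m ih =>
    rw [List.range_succ, List.foldl_append, ih]
    simp only [List.foldl_cons, List.foldl_nil, inner_fold]
    rw [Prod.mk.injEq]
    constructor
    · rw [show (m + 1) * n = m * n + n from by ring, List.range_add, List.map_append,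
        List.map_map]
      congr 1
      apply List.map_congr_left
      intro j hj
      rw [List.mem_range] at hj
      have hdiv : (m * n + j) / n = m := by
        rw [Nat.mul_comm m n, Nat.mul_add_div hn, Nat.div_eq_of_lt hj]
        omega
      simp only [Function.comp_apply]
      rw [hdiv]
      push_cast
      rfl
    · push_cast; ring

-- B's seeds column: repeating each seed s+1 (s < m) n times gives the flat map.
lemma seeds_fold (n m : ℕ) (hn : 0 < n) :
    (List.range m).foldl
        (fun (acc : List Int) (s : ℕ) => acc ++ List.replicate n ((s : Int) + 1)) []
      = (List.range (m * n)).map (fun i => ((i / n : ℕ) : Int) + 1) := by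
  induction m with
  | zero => simp
  | succ m ih =>
    rw [List.range_succ, List.foldl_append, List.foldl_cons, List.foldl_nil, ih,
      show (m + 1) * n = m * n + n from by ring, List.range_add, List.map_append]
    congr 1
    symm
    rw [List.eq_replicate_iff]
    refine ⟨by simp, ?_⟩
    intro b hb
    simp only [List.mem_map, List.mem_range] at hb
    obtain ⟨j, hj, rfl⟩ := hb
    obtain ⟨a, ha, rfl⟩ := hj
    have hdiv : (m * n + a) / n = m := by
      rw [Nat.mul_comm m n, Nat.mul_add_div hn, Nat.div_eq_of_lt ha]
      omega
    rw [hdiv]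

-- ===== VERDICT (by name: the statement is the Claim_ definition above) =====
theorem balanced_pairs_py_spec : Claim_equal_balanced_pairs_py := by
  intro c _
  unfold Spec_balanced_pairs_py balanced_pairs_py balanced_pairs_py_alt
  by_cases hc : c ≤ 0
  · have h1 : PySem.List.pyRange 0 c 1 = [] := by
      simp [PySem.List.pyRange]; omega
    have h2 : c.toNat = 0 := by omega
    rw [h1, h2,
      show PySem.List.pyRange 1 17 1 = [1,2,3,4,5,6,7,8,9,10,11,12,13,14,15,16] from by decide]
    simp [List.foldl]
  · push_neg at hc
    obtain ⟨n, rfl⟩ : ∃ n : ℕ, c = (n : Int) := ⟨c.toNat, (Int.toNat_of_nonneg hc.le).symm⟩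
    have hn : 0 < n := by exact_mod_cast hc
    rw [PySem.List.pyRange_zero_natCast,
      show PySem.List.pyRange 1 17 1 = (List.range 16).map (fun (s : ℕ) => ((s : Int) + 1)) from by decide,
      List.foldl_map]
    simp only [List.foldl_map, Int.toNat_natCast]
    rw [outer_fold n hn 16, seeds_fold n 16 hn]
    simp only [List.length_map, List.length_range]
    rw [show ((16 * n : ℕ) : Int) = 16 * (n : Int) from by push_cast; ring] at *
    rw [show (16 * (n : Int)) = ((16 * n : ℕ) : Int) from by push_cast; ring,
      PySem.List.pyRange_zero_natCast, List.map_map, List.zip_map', List.map_map]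
    rfl
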